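-- pv_equiv track=rewrite | github.com/isaaczhu1/HIKARU | finetuning/data.py | _group_by_game
-- ===== SOURCE A (Python) =====
-- from typing import Dict, Iterable, List, Sequence
--
-- def _group_by_game(records: Iterable[Dict]) -> Dict[int, List[Dict]]:
--     grouped: Dict[int, List[Dict]] = {}
--     for rec in records:
--         gid = int(rec.get("game_id", -1))
--         if gid < 0:
--             raise ValueError(f"Missing or invalid game_id in record: {rec}")
--         grouped.setdefault(gid, []).append(rec)
--     # Sort each game's steps by t to ensure correct temporal order.
--     for steps in grouped.values():
--         steps.sort(key=lambda r: int(r.get("t", 0)))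
--     return grouped
-- ===== SOURCE B (Python) =====
-- from typing import Dict, Iterable, List
--
-- def _group_by_game(records: Iterable[Dict]) -> Dict[int, List[Dict]]:
--     records_list = list(records)
--     grouped: Dict[int, List[Dict]] = {}
--     # Validate in original order and fix key insertion order.
--     for rec in records_list:
--         gid = int(rec.get("game_id", -1))
--         if gid < 0:
--             raise ValueError(f"Missing or invalid game_id in record: {rec}")
--         grouped.setdefault(gid, [])
--     # One global stable sort by t; stability reproduces per-bucket order.
--     for rec in sorted(records_list, key=lambda r: int(r.get("t", 0))):
--         grouped[int(rec.get("game_id", -1))].append(rec)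
--     return grouped
-- ===== Notes on version B (the rewrite author's own statement) =====
-- stated objective: alternative
-- what changed: Instead of building the buckets first and then sorting each bucket, B seeds the keys in encounter order and fills all buckets from ONE global stable sort of the records by t, relying on sort stability to reproduce each bucket's order.
import Mathlib
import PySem

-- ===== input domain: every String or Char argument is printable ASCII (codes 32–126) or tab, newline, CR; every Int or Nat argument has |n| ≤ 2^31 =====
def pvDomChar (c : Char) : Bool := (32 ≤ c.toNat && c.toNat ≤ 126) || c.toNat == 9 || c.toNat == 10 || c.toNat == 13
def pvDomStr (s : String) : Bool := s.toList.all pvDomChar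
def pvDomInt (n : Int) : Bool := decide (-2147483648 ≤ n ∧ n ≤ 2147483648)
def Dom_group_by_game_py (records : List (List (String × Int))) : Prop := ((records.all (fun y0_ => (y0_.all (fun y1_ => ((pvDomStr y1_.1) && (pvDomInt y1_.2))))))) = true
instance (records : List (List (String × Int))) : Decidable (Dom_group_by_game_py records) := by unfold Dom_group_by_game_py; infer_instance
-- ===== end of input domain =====

-- B replaces A's per-bucket sorts by one global stable sort of the records by t (keys pre-seeded
-- in encounter order); equal output on all inputs where A returns (Pre_ excludes A's ValueError).

-- rec.get(k, dflt) on a record (a Python dict, modelled as its association list)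
def recGetD (rec : List (String × Int)) (k : String) (dflt : Int) : Int :=
  (PySem.Dict.mk rec).getD k dflt

-- ===== PORT A =====
-- the 'if gid < 0: raise ValueError' branch raises; exactly those inputs are excluded by Pre_
def group_by_game_py (records : List (List (String × Int))) : List (Int × List (List (String × Int))) :=
  ((records.foldl (fun d rec => d.modify (recGetD rec "game_id" (-1)) [] (fun v => v ++ [rec]))
      PySem.Dict.empty).items.map (fun p => (p.1, PySem.List.sorted p.2 (fun r => recGetD r "t" 0))))

-- ===== PORT B =====
-- 'grouped[gid].append(rec)': gid is always a seeded key, so the modify default [] is never used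
def group_by_game_py_alt (records : List (List (String × Int))) : List (Int × List (List (String × Int))) :=
  ((PySem.List.sorted records (fun r => recGetD r "t" 0)).foldl
      (fun d rec => d.modify (recGetD rec "game_id" (-1)) [] (fun v => v ++ [rec]))
      (records.foldl (fun d rec => d.setdefault (recGetD rec "game_id" (-1)) []) PySem.Dict.empty)).items

-- ===== PRECONDITION & SPEC =====
-- Pre_ excludes exactly the inputs where A raises ValueError: a record whose game_id is missing or negative.
def Pre_group_by_game_py (records : List (List (String × Int))) : Prop :=
  ∀ rec ∈ records, 0 ≤ recGetD rec "game_id" (-1)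
instance (records : List (List (String × Int))) : Decidable (Pre_group_by_game_py records) := by
  unfold Pre_group_by_game_py; infer_instance
def pvWitness_group_by_game_py : (List (List (String × Int))) := ([[("game_id", 1), ("t", 0)], [("game_id", 0), ("t", 2)]])

def Spec_group_by_game_py (records : List (List (String × Int))) (out : List (Int × List (List (String × Int)))) : Prop := out = group_by_game_py_alt records
instance (records : List (List (String × Int))) (out : List (Int × List (List (String × Int)))) : Decidable (Spec_group_by_game_py records out) := by unfold Spec_group_by_game_py; infer_instance

-- ===== CLAIM (what is proved, stated in full; the proofs are below) =====
def Claim_equal_group_by_game_py : Prop := ∀ (records : List (List (String × Int))), Dom_group_by_game_py records → Pre_group_by_game_py records → Spec_group_by_game_py records (group_by_game_py records)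

-- ===== LEMMAS AND PROOFS =====

lemma insertBy_of_forall_before {α : Type} (before : α → α → Bool) (x : α) (ys : List α)
    (h : ∀ y ∈ ys, before x y = true) :
    PySem.List.insertBy before x ys = x :: ys := by
  cases ys with
  | nil => simp [PySem.List.insertBy]
  | cons y t => simp [PySem.List.insertBy, h y (List.mem_cons_self)]

lemma filter_insertBy {α κ : Type} [LinearOrder κ] (key : α → κ) (p : α → Bool) (x : α)
    (ys : List α) (hs : ys.Pairwise (fun a b => key a ≤ key b)) :
    (PySem.List.insertBy (fun a b => decide (key a < key b)) x ys).filter p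
      = if p x then PySem.List.insertBy (fun a b => decide (key a < key b)) x (ys.filter p)
        else ys.filter p := by
  induction ys with
  | nil => cases hpx : p x <;> simp [PySem.List.insertBy, hpx]
  | cons y t ih =>
    rcases List.pairwise_cons.mp hs with ⟨hy, ht⟩
    by_cases hlt : key x < key y
    · have hall : ∀ z ∈ t.filter p, (fun a b => decide (key a < key b)) x z = true := by
        intro z hz
        simp [lt_of_lt_of_le hlt (hy z (List.mem_of_mem_filter hz))]
      have hfront := insertBy_of_forall_before (fun a b => decide (key a < key b)) x
        (t.filter p) hall
      cases hpx : p x <;> cases hpy : p y <;>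
        simp [PySem.List.insertBy, hlt, hpx, hpy, hfront]
    · cases hpx : p x <;> cases hpy : p y <;>
        simp [PySem.List.insertBy, hlt, hpx, hpy, ih ht]

lemma sorted_filter {α κ : Type} [LinearOrder κ] (key : α → κ) (p : α → Bool) (l : List α) :
    PySem.List.sorted (l.filter p) key = (PySem.List.sorted l key).filter p := by
  induction l using List.reverseRecOn with
  | nil => simp [PySem.List.sorted_eq_foldl_insertBy]
  | append_singleton l x ih =>
    have hpw := PySem.List.sorted_pairwise l key
    have hstep : PySem.List.sorted (l ++ [x]) key
        = PySem.List.insertBy (fun a b => decide (key a < key b)) x (PySem.List.sorted l key) := by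
      rw [PySem.List.sorted_eq_foldl_insertBy (l ++ [x]) key, List.foldl_append,
        ← PySem.List.sorted_eq_foldl_insertBy l key]
      rfl
    rw [List.filter_append, hstep, filter_insertBy key p x _ hpw, ← ih]
    cases hpx : p x
    · simp [hpx]
    · have hstep2 : PySem.List.sorted (l.filter p ++ [x]) key
          = PySem.List.insertBy (fun a b => decide (key a < key b)) x
              (PySem.List.sorted (l.filter p) key) := by
        rw [PySem.List.sorted_eq_foldl_insertBy (l.filter p ++ [x]) key, List.foldl_append,
          ← PySem.List.sorted_eq_foldl_insertBy (l.filter p) key]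
        rfl
      simp [hpx, hstep2]

lemma keys_foldl_setdefault_key {κ ν β : Type} [BEq κ] [LawfulBEq κ] (l : List β) (key : β → κ)
    (v : ν) (d : PySem.Dict κ ν) :
    (l.foldl (fun d x => d.setdefault (key x) v) d).keys = PySem.Set.update d.keys (l.map key) := by
  induction l generalizing d with
  | nil => simp [PySem.Set.update]
  | cons x t ih =>
    rw [List.foldl_cons, ih, List.map_cons, PySem.Set.update_cons]
    congr 1
    rw [PySem.Dict.keys_setdefault, PySem.Set.add_eq_ite]
    by_cases hc : d.contains (key x) = true
    · simp [hc, (PySem.Dict.contains_iff_mem_keys d (key x)).mp hc]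
    · have hnm : ¬ (key x ∈ d.keys) := fun h => hc ((PySem.Dict.contains_iff_mem_keys d (key x)).mpr h)
      simp [hc, hnm]

lemma getD_foldl_setdefault {κ ν β : Type} [BEq κ] [LawfulBEq κ] (l : List β) (key : β → κ)
    (v : ν) (d : PySem.Dict κ ν) (g : κ) :
    (l.foldl (fun d x => d.setdefault (key x) v) d).getD g v = d.getD g v := by
  induction l generalizing d with
  | nil => rfl
  | cons x t ih =>
    rw [List.foldl_cons, ih]
    by_cases hg : g = key x
    · rw [hg]; exact PySem.Dict.getD_setdefault_self d (key x) v v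
    · rw [PySem.Dict.getD_eq_get?_getD, PySem.Dict.get?_setdefault_of_ne d v hg,
        ← PySem.Dict.getD_eq_get?_getD]

lemma getD_foldl_modify_key {κ β : Type} [BEq κ] [LawfulBEq κ] (l : List β) (key : β → κ)
    (d : PySem.Dict κ (List β)) (g : κ) :
    (l.foldl (fun d r => d.modify (key r) [] (fun v => v ++ [r])) d).getD g []
      = d.getD g [] ++ l.filter (fun r => key r == g) := by
  have h := PySem.Dict.getD_foldl_modify_append (l.map (fun r => (key r, r))) d g
  rw [List.foldl_map] at h
  rw [h, List.filter_map, List.map_map]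
  simp [Function.comp_def]

lemma keys_foldl_modify_key' {κ β : Type} [BEq κ] [LawfulBEq κ] (l : List β) (key : β → κ)
    (d : PySem.Dict κ (List β)) :
    (l.foldl (fun d r => d.modify (key r) [] (fun v => v ++ [r])) d).keys
      = PySem.Set.update d.keys (l.map key) :=
  PySem.Dict.keys_foldl_modify_key l key [] (fun _ r v => v ++ [r]) d

lemma set_update_of_subset {κ : Type} [BEq κ] [LawfulBEq κ] (s : PySem.Set κ) (xs : List κ)
    (h : ∀ x ∈ xs, x ∈ s) : PySem.Set.update s xs = s := by
  rw [PySem.Set.update_eq_append_filter]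
  have hnil : (PySem.Set.ofList xs).filter (fun y => !PySem.Set.contains s y) = [] := by
    rw [List.filter_eq_nil_iff]
    intro y hy
    have hmem : y ∈ s := h y ((PySem.Set.mem_ofList xs y).mp hy)
    simp [hmem]
  rw [hnil, List.append_nil]

-- A = B, stated over abstract key projections (gid = game_id lookup, tk = t lookup)
lemma group_sort_eq_sort_group {β : Type} (l : List β) (gid : β → Int) (tk : β → Int) :
    ((l.foldl (fun d r => d.modify (gid r) [] (fun v => v ++ [r])) PySem.Dict.empty).items.map
        (fun p => (p.1, PySem.List.sorted p.2 tk)))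
      = ((PySem.List.sorted l tk).foldl (fun d r => d.modify (gid r) [] (fun v => v ++ [r]))
          (l.foldl (fun d r => d.setdefault (gid r) []) PySem.Dict.empty)).items := by
  set dA := l.foldl (fun d r => d.modify (gid r) [] (fun v => v ++ [r])) PySem.Dict.empty with hdA
  set seeded := l.foldl (fun d r => d.setdefault (gid r) []) PySem.Dict.empty with hseeded
  set srt := PySem.List.sorted l tk with hsrt
  set dB := srt.foldl (fun d r => d.modify (gid r) [] (fun v => v ++ [r])) seeded with hdB
  have hAkeys : dA.keys = PySem.Set.ofList (l.map gid) := by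
    rw [hdA, keys_foldl_modify_key' l gid PySem.Dict.empty]
    simp [PySem.Set.update_nil_left]
  have hSkeys : seeded.keys = PySem.Set.ofList (l.map gid) := by
    rw [hseeded, keys_foldl_setdefault_key]
    simp [PySem.Set.update_nil_left]
  have hBkeys : dB.keys = PySem.Set.ofList (l.map gid) := by
    rw [hdB, keys_foldl_modify_key' srt gid seeded, hSkeys]
    apply set_update_of_subset
    intro x hx
    rcases List.mem_map.mp hx with ⟨r, hr, rfl⟩
    exact (PySem.Set.mem_ofList _ _).mpr
      (List.mem_map.mpr ⟨r, (PySem.List.mem_sorted l tk false r).mp (hsrt ▸ hr), rfl⟩)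
  have hAnodup : dA.keys.Nodup := by rw [hAkeys]; exact PySem.Set.nodup_ofList _
  have hBnodup : dB.keys.Nodup := by rw [hBkeys]; exact PySem.Set.nodup_ofList _
  have hAval : ∀ g, dA.getD g [] = l.filter (fun r => gid r == g) := by
    intro g
    rw [hdA, getD_foldl_modify_key l gid PySem.Dict.empty g]
    simp [PySem.Dict.getD_empty]
  have hBval : ∀ g, dB.getD g [] = srt.filter (fun r => gid r == g) := by
    intro g
    rw [hdB, getD_foldl_modify_key srt gid seeded g, hseeded,
      getD_foldl_setdefault l gid [] PySem.Dict.empty g]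
    simp [PySem.Dict.getD_empty]
  rw [PySem.Dict.items_eq_map_keys dA hAnodup [], PySem.Dict.items_eq_map_keys dB hBnodup [],
    hAkeys, hBkeys, List.map_map]
  apply List.map_congr_left
  intro g _
  simp only [Function.comp_apply]
  rw [hAval g, hBval g, hsrt, sorted_filter tk (fun r => gid r == g) l]

-- ===== VERDICT (by name: the statement is the Claim_ definition above) =====
theorem group_by_game_py_spec : Claim_equal_group_by_game_py := by
  intro records _ _
  show group_by_game_py records = group_by_game_py_alt records
  unfold group_by_game_py group_by_game_py_alt
  exact group_sort_eq_sort_group records (fun rec => recGetD rec "game_id" (-1))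
    (fun r => recGetD r "t" 0)
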